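-- pv_equiv track=rewrite | github.com/isaacLi2005/PracticeProblems | past/chessboardAndQueens.py | chessboardAndQueensH
-- ===== SOURCE A (Python) =====
-- def isValidPlacement(coords, queensL, reservedSquares):
--     (newRow, newCol) = coords
--     if (newRow, newCol) in reservedSquares:
--         return False
--     for (oldRow, oldCol) in queensL:
--         if (newRow == oldRow
--             or newCol == oldCol
--             or abs(newRow - oldRow) == abs(newCol - oldCol)):
--             return False
--     return True
--
-- def chessboardAndQueensH(row, reservedSquares, currQueens):
--     if row == 8:
--         return 1
--
--     result = 0
--     for col in range(8):
--         if isValidPlacement((row, col), currQueens, reservedSquares):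
--             currQueens.append((row, col))
--             result += chessboardAndQueensH(row + 1, reservedSquares, currQueens)
--             currQueens.pop()
--     return result
-- ===== SOURCE B (Python) =====
-- def chessboardAndQueensH(row, reservedSquares, currQueens):
--     reserved = set(reservedSquares)
--     boards = [list(currQueens)]
--     r = row
--     while r != 8 and boards:
--         boards = [b + [(r, c)]
--                   for b in boards
--                   for c in range(8)
--                   if (r, c) not in reserved
--                   and all(r != qr and c != qc and abs(r - qr) != abs(c - qc)
--                           for qr, qc in b)]
--         r += 1
--     return len(boards)
-- ===== Notes on version B (the rewrite author's own statement) =====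
-- stated objective: alternative
-- what changed: B replaces A's depth-first recursive backtracking that mutates a shared queen list by an iterative breadth-first search: a while loop that, level by level, materializes the list of all valid partial boards for each row with a comprehension and finally returns the length of that list; B does not mutate currQueens.
import Mathlib
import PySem

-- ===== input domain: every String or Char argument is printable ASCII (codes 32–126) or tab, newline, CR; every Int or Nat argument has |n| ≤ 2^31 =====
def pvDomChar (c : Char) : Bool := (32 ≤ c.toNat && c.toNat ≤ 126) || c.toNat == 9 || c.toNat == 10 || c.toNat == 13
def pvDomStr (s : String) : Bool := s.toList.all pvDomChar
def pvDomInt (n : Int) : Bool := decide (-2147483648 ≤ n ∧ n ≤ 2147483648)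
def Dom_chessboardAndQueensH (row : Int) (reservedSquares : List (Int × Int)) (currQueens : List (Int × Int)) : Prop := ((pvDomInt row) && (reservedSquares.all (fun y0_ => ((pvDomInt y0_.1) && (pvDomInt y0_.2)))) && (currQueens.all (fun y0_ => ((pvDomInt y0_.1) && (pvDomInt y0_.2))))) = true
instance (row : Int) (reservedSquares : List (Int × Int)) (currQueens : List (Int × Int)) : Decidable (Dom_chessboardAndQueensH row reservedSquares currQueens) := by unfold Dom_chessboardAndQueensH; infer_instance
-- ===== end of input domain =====

-- B replaces A's recursive depth-first backtracking (which appends/pops currQueens, net unchanged)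
-- by an iterative breadth-first loop materializing all valid partial boards per row; return values proved equal.


-- ===== PORT A =====
-- the 'for (oldRow, oldCol) in queensL' loop of isValidPlacement, with its early return False
def isValidLoop (r c : Int) : List (Int × Int) → Bool
  | [] => true
  | (oldRow, oldCol) :: rest =>
      if r == oldRow || c == oldCol || (r - oldRow).natAbs == (c - oldCol).natAbs then false
      else isValidLoop r c rest

def isValidPlacement (coords : Int × Int) (queensL : List (Int × Int)) (reservedSquares : List (Int × Int)) : Bool :=
  if reservedSquares.contains coords then false
  else isValidLoop coords.1 coords.2 queensL

-- A's recursion, with a fuel counter as totality guard; fuel 9 is never exhausted: every recursive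
-- call appends a queen with a column of 0..7 distinct from all earlier ones, so the depth is ≤ 9
def chessboardAndQueensHF : Nat → Int → List (Int × Int) → List (Int × Int) → Int
  | 0, _, _, _ => 0
  | fuel + 1, row, reservedSquares, currQueens =>
      if row == 8 then 1
      else
        (PySem.List.pyRange 0 8 1).foldl
          (fun result col =>
            if isValidPlacement (row, col) currQueens reservedSquares then
              result + chessboardAndQueensHF fuel (row + 1) reservedSquares (currQueens ++ [(row, col)])
            else result) 0

def chessboardAndQueensH (row : Int) (reservedSquares : List (Int × Int)) (currQueens : List (Int × Int)) : Int :=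
  chessboardAndQueensHF 9 row reservedSquares currQueens

-- ===== PORT B =====
-- the comprehension's filter condition on one board b
def validB (reserved : PySem.Set (Int × Int)) (r c : Int) (b : List (Int × Int)) : Bool :=
  !(PySem.Set.contains reserved (r, c)) &&
    b.all (fun q => !(r == q.1) && !(c == q.2) && !((r - q.1).natAbs == (c - q.2).natAbs))

-- one iteration of the while body: the list comprehension building the next frontier
def stepB (reserved : PySem.Set (Int × Int)) (r : Int) (boards : List (List (Int × Int))) : List (List (Int × Int)) :=
  boards.flatMap (fun b =>
    ((PySem.List.pyRange 0 8 1).filter (fun c => validB reserved r c b)).map (fun c => b ++ [(r, c)]))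

-- the while loop, with a fuel counter as totality guard; at most 9 iterations can run, since every
-- iteration extends each surviving board by a queen in a fresh column of 0..7
def bfsLoop : Nat → PySem.Set (Int × Int) → Int → List (List (Int × Int)) → Int
  | 0, _, _, _ => 0
  | fuel + 1, reserved, r, boards =>
      if r == 8 || boards.isEmpty then (boards.length : Int)
      else bfsLoop fuel reserved (r + 1) (stepB reserved r boards)

def chessboardAndQueensH_alt (row : Int) (reservedSquares : List (Int × Int)) (currQueens : List (Int × Int)) : Int :=
  bfsLoop 9 (PySem.Set.ofList reservedSquares) row [currQueens]

-- ===== PRECONDITION & SPEC =====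
def Spec_chessboardAndQueensH (row : Int) (reservedSquares : List (Int × Int)) (currQueens : List (Int × Int)) (out : Int) : Prop := out = chessboardAndQueensH_alt row reservedSquares currQueens
instance (row : Int) (reservedSquares : List (Int × Int)) (currQueens : List (Int × Int)) (out : Int) : Decidable (Spec_chessboardAndQueensH row reservedSquares currQueens out) := by unfold Spec_chessboardAndQueensH; infer_instance

-- ===== CLAIM (what is proved, stated in full; the proofs are below) =====
def Claim_equal_chessboardAndQueensH : Prop := ∀ (row : Int) (reservedSquares : List (Int × Int)) (currQueens : List (Int × Int)), Dom_chessboardAndQueensH row reservedSquares currQueens → Spec_chessboardAndQueensH row reservedSquares currQueens (chessboardAndQueensH row reservedSquares currQueens)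

-- ===== LEMMAS AND PROOFS =====

-- A's conditional-accumulate fold equals the sum over the filtered, mapped list
lemma foldl_if_add_eq_sum (l : List Int) (p : Int → Bool) (g : Int → Int) (init : Int) :
    l.foldl (fun acc x => if p x then acc + g x else acc) init
      = init + ((l.filter p).map g).sum := by
  induction l generalizing init with
  | nil => simp
  | cons x t ih =>
      simp only [List.foldl_cons, List.filter_cons]
      by_cases hx : p x = true
      · simp [hx, ih, add_assoc]
      · simp [hx, ih]

-- sum of map of flatMap, split per block
lemma sum_map_flatMap {α β : Type} (l : List α) (f : α → List β) (g : β → Int) :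
    ((l.flatMap f).map g).sum = (l.map (fun b => ((f b).map g).sum)).sum := by
  induction l with
  | nil => rfl
  | cons x t ih =>
      rw [List.flatMap_cons, List.map_append, List.sum_append, ih]
      simp

-- A's validity check equals B's filter condition
lemma isValidLoop_eq_all (r c : Int) (l : List (Int × Int)) :
    isValidLoop r c l
      = l.all (fun q => !(r == q.1) && !(c == q.2) && !((r - q.1).natAbs == (c - q.2).natAbs)) := by
  induction l with
  | nil => rfl
  | cons q t ih =>
      obtain ⟨a, b⟩ := q
      simp only [isValidLoop, List.all_cons, ← Bool.not_or]
      cases hC : (r == a || c == b || (r - a).natAbs == (c - b).natAbs) <;> simp [ih]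

lemma valid_eq (res b : List (Int × Int)) (r c : Int) :
    isValidPlacement (r, c) b res = validB (PySem.Set.ofList res) r c b := by
  unfold isValidPlacement validB
  have hc : PySem.Set.contains (PySem.Set.ofList res) (r, c) = res.contains (r, c) := by
    by_cases hm : (r, c) ∈ res <;> simp [hm]
  rw [hc]
  cases h : res.contains (r, c) <;> simp [isValidLoop_eq_all]

-- the BFS frontier sums the DFS counts of its boards, level-synchronously in the fuel
lemma bfs_eq_sum_dfs (fuel : Nat) :
    ∀ (r : Int) (res : List (Int × Int)) (boards : List (List (Int × Int))),
      bfsLoop fuel (PySem.Set.ofList res) r boards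
        = (boards.map (fun b => chessboardAndQueensHF fuel r res b)).sum := by
  induction fuel with
  | zero =>
      intro r res boards
      simp [bfsLoop, chessboardAndQueensHF]
  | succ fuel ih =>
      intro r res boards
      simp only [bfsLoop, chessboardAndQueensHF]
      by_cases h8 : r = 8
      · simp [h8]
      · have h8' : (r == 8) = false := by simpa using h8
        simp only [h8', Bool.false_or, Bool.false_eq_true, if_false]
        by_cases he : boards.isEmpty
        · have : boards = [] := List.isEmpty_iff.mp he
          simp [this]
        · have he' : boards.isEmpty = false := by simpa using he
          simp only [he', Bool.false_eq_true, if_false]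
          rw [ih, stepB, sum_map_flatMap]
          congr 1
          apply List.map_congr_left
          intro b _
          rw [foldl_if_add_eq_sum, List.map_map, zero_add]
          have hf : List.filter (fun col => isValidPlacement (r, col) b res) (PySem.List.pyRange 0 8 1)
              = List.filter (fun c => validB (PySem.Set.ofList res) r c b) (PySem.List.pyRange 0 8 1) := by
            apply List.filter_congr
            intro c _
            exact valid_eq res b r c
          rw [hf]
          rfl

-- ===== VERDICT (by name: the statement is the Claim_ definition above) =====
theorem chessboardAndQueensH_spec : Claim_equal_chessboardAndQueensH := by
  intro row reservedSquares currQueens _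
  unfold Spec_chessboardAndQueensH chessboardAndQueensH chessboardAndQueensH_alt
  rw [bfs_eq_sum_dfs]
  simp
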